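-- pv_equiv track=rewrite | github.com/SarahYang163/leetcode | 面试经验/1113.py | arrayStringsAreEqual
-- ===== SOURCE A (Python) =====
-- from typing import List
--
-- def arrayStringsAreEqual(word1: List[str], word2: List[str]) -> bool:
--     s1 = ""
--     s2 = ""
--     for w in word1:
--         s1 += w
--     for w in word2:
--         s2 += w
--     return s1 == s2
-- ===== SOURCE B (Python) =====
-- def arrayStringsAreEqual(word1, word2):
--     i1 = j1 = i2 = j2 = 0
--     while True:
--         # skip to the next available character on each side
--         while i1 < len(word1) and j1 == len(word1[i1]):
--             i1 += 1
--             j1 = 0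
--         while i2 < len(word2) and j2 == len(word2[i2]):
--             i2 += 1
--             j2 = 0
--         done1 = i1 == len(word1)
--         done2 = i2 == len(word2)
--         if done1 or done2:
--             return done1 and done2
--         if word1[i1][j1] != word2[i2][j2]:
--             return False
--         j1 += 1
--         j2 += 1
-- ===== Notes on version B (the rewrite author's own statement) =====
-- stated objective: alternative
-- what changed: B streams characters with parallel word/char cursors and early-exits on the first mismatch instead of materialising both concatenated strings and comparing them.
import Mathlib
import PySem

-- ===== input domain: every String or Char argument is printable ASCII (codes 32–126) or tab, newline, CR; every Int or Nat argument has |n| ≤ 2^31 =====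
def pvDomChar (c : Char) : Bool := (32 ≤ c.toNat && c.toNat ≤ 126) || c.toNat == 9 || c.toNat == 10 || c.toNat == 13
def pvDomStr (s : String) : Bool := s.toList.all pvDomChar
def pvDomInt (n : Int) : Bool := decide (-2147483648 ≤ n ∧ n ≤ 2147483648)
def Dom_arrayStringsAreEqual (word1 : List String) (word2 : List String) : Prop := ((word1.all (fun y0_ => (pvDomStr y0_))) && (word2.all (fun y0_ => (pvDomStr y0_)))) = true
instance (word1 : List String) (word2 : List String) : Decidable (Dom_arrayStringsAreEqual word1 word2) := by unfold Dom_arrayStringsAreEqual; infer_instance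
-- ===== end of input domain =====

-- B streams characters with parallel cursors and early-exits on a mismatch instead of
-- materialising both concatenated strings; alternative algorithm, same asymptotic cost.

-- ===== PORT A =====
-- strings are handled as their character lists (PySem convention); 's += w' appends char lists
def arrayStringsAreEqual (word1 : List String) (word2 : List String) : Bool :=
  let s1 := word1.foldl (fun s w => s ++ w.toList) ([] : List Char)
  let s2 := word2.foldl (fun s w => s ++ w.toList) ([] : List Char)
  s1 == s2

-- ===== PORT B =====
-- the while-loops of Source B as recursion: the cursors (i, j) are represented by the remaining
-- suffix of words / of characters in the current word; the skip loops are the first two cases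
def pvStream (xs : List (List Char)) (ys : List (List Char)) : Bool :=
  match xs, ys with
  | [] :: xs', ys => pvStream xs' ys
  | xs, [] :: ys' => pvStream xs ys'
  | [], [] => true
  | [], _ :: _ => false
  | _ :: _, [] => false
  | (a :: as) :: xs', (b :: bs) :: ys' => a == b && pvStream (as :: xs') (bs :: ys')
termination_by (xs.length + xs.flatten.length, ys.length + ys.flatten.length)
decreasing_by all_goals (simp; omega)

def arrayStringsAreEqual_alt (word1 : List String) (word2 : List String) : Bool :=
  pvStream (word1.map String.toList) (word2.map String.toList)

-- ===== PRECONDITION & SPEC =====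
def Spec_arrayStringsAreEqual (word1 : List String) (word2 : List String) (out : Bool) : Prop := out = arrayStringsAreEqual_alt word1 word2
instance (word1 : List String) (word2 : List String) (out : Bool) : Decidable (Spec_arrayStringsAreEqual word1 word2 out) := by unfold Spec_arrayStringsAreEqual; infer_instance

-- ===== CLAIM (what is proved, stated in full; the proofs are below) =====
def Claim_equal_arrayStringsAreEqual : Prop := ∀ (word1 : List String) (word2 : List String), Dom_arrayStringsAreEqual word1 word2 → Spec_arrayStringsAreEqual word1 word2 (arrayStringsAreEqual word1 word2)

-- ===== LEMMAS AND PROOFS =====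

-- the streaming comparison decides equality of the flattened character streams
theorem pvStream_eq_flatten_beq (xs ys : List (List Char)) :
    pvStream xs ys = (xs.flatten == ys.flatten) := by
  fun_induction pvStream xs ys <;> simp_all

-- ===== VERDICT (by name: the statement is the Claim_ definition above) =====
theorem arrayStringsAreEqual_spec : Claim_equal_arrayStringsAreEqual := by
  intro word1 word2 _
  unfold Spec_arrayStringsAreEqual arrayStringsAreEqual arrayStringsAreEqual_alt
  simp [pvStream_eq_flatten_beq]
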